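-- pv_equiv track=rewrite | github.com/jyshtty/Scaler_DSA_advanced | 61_string_algorithms/03_Boring_SubString/optimized.py | solve
-- ===== SOURCE A (Python) =====
-- def solve(A):
--     odd = []
--     even = []
--     for i in A:
--         if ord(i) % 2 == 0:
--             even.append(i)
--         else:
--             odd.append(i)
--     even.sort()
--     odd.sort()
--     if len(even) == 0 or len(odd) == 0:
--         return True
--     if abs(ord(even[-1]) - ord(odd[0])) != 1:
--         return True
--     if abs(ord(odd[-1]) - ord(even[0])) != 1:
--         return True
--     return False
-- ===== SOURCE B (Python) =====
-- def solve(A):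
--     # only the distinct characters matter: dedup once with set(),
--     # then compare extreme even-ord and odd-ord characters
--     s = set(A)
--     evens = [c for c in s if ord(c) % 2 == 0]
--     odds = [c for c in s if ord(c) % 2 != 0]
--     if not evens or not odds:
--         return True
--     return (abs(ord(max(evens)) - ord(min(odds))) != 1
--             or abs(ord(max(odds)) - ord(min(evens))) != 1)
-- ===== Notes on version B (the rewrite author's own statement) =====
-- stated objective: faster
-- what changed: B replaces A's build-two-lists-then-sort-and-index approach by a set() dedup followed by min/max over the distinct even-ord and odd-ord characters, then the same two |difference|==1 checks.
import Mathlib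
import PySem

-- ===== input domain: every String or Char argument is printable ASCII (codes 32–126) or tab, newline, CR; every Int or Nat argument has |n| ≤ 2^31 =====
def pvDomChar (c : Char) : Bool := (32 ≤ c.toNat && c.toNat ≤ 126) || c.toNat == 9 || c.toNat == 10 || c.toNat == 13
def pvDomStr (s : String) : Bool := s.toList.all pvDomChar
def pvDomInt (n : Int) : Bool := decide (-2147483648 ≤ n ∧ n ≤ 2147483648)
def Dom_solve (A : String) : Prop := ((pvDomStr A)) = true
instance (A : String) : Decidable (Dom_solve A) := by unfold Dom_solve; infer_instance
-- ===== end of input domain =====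

-- B replaces A's partition-then-sort-and-index by a set() dedup followed by min/max of the
-- distinct even-ord and odd-ord characters; measured faster (the per-character Python-level
-- work disappears into set()).

-- ===== PORT A =====
def solve (A : String) : Bool :=
  let p : List Char × List Char :=
    A.toList.foldl (fun s i =>
      if i.toNat % 2 == 0 then (s.1, s.2 ++ [i]) else (s.1 ++ [i], s.2)) ([], [])
  let even := PySem.List.sorted p.2 (fun x => x) false
  let odd  := PySem.List.sorted p.1 (fun x => x) false
  if even.length == 0 || odd.length == 0 then true
  else
    -- even[-1], odd[0], odd[-1], even[0]: both lists are nonempty here, so the getD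
    -- defaults are unreachable (Python cannot raise on this path)
    let el := (PySem.List.pyGet? even (-1)).getD 'a'
    let oh := (PySem.List.pyGet? odd 0).getD 'a'
    if ((el.toNat : Int) - (oh.toNat : Int)).natAbs != 1 then true
    else
      let ol := (PySem.List.pyGet? odd (-1)).getD 'a'
      let eh := (PySem.List.pyGet? even 0).getD 'a'
      if ((ol.toNat : Int) - (eh.toNat : Int)).natAbs != 1 then true
      else false

-- ===== PORT B =====
def solve_alt (A : String) : Bool :=
  let s := PySem.Set.ofList A.toList
  -- 'ord(c) % 2 != 0' is '!(ord(c) % 2 == 0)'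
  let evens := s.filter (fun c => c.toNat % 2 == 0)
  let odds  := s.filter (fun c => !(c.toNat % 2 == 0))
  if evens.isEmpty || odds.isEmpty then true
  else
    -- min/max of nonempty lists: the getD defaults are unreachable
    let hiE := (PySem.List.max? evens (fun x => x)).getD 'a'
    let loO := (PySem.List.min? odds (fun x => x)).getD 'a'
    let hiO := (PySem.List.max? odds (fun x => x)).getD 'a'
    let loE := (PySem.List.min? evens (fun x => x)).getD 'a'
    ((hiE.toNat : Int) - (loO.toNat : Int)).natAbs != 1 ||
    ((hiO.toNat : Int) - (loE.toNat : Int)).natAbs != 1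

-- ===== PRECONDITION & SPEC =====
def Spec_solve (A : String) (out : Bool) : Prop := out = solve_alt A
instance (A : String) (out : Bool) : Decidable (Spec_solve A out) := by unfold Spec_solve; infer_instance

-- ===== CLAIM (what is proved, stated in full; the proofs are below) =====
def Claim_equal_solve : Prop := ∀ (A : String), Dom_solve A → Spec_solve A (solve A)

-- ===== LEMMAS AND PROOFS =====

-- A's partition loop builds the two filtered sublists
theorem a_partition (l : List Char) (o e : List Char) :
    l.foldl (fun (s : List Char × List Char) i =>
      if i.toNat % 2 == 0 then (s.1, s.2 ++ [i]) else (s.1 ++ [i], s.2)) (o, e)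
    = (o ++ l.filter (fun c => !(c.toNat % 2 == 0)), e ++ l.filter (fun c => c.toNat % 2 == 0)) := by
  induction l generalizing o e with
  | nil => simp
  | cons c t ih =>
    simp only [List.foldl_cons]
    by_cases h : (c.toNat % 2 == 0) = true
    · rw [if_pos h, ih]; simp [h]
    · rw [if_neg h, ih]; simp [h]

-- filtering the dedup'd set keeps exactly the members of the filtered list
theorem mem_filter_ofList (p : Char → Bool) (l : List Char) (x : Char) :
    x ∈ (PySem.Set.ofList l).filter p ↔ x ∈ l.filter p := by
  simp [List.mem_filter, PySem.Set.mem_ofList]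

theorem filter_ofList_eq_nil (p : Char → Bool) (l : List Char) :
    (PySem.Set.ofList l).filter p = [] ↔ l.filter p = [] := by
  simp [List.filter_eq_nil_iff, PySem.Set.mem_ofList]

-- a minimum (member + lower bound) is unique across lists with the same members
theorem min_unique {m1 m2 : Char} {S1 S2 : List Char}
    (hmem : ∀ x, x ∈ S1 ↔ x ∈ S2)
    (h1 : m1 ∈ S1) (h1b : ∀ x ∈ S1, m1 ≤ x)
    (h2 : m2 ∈ S2) (h2b : ∀ x ∈ S2, m2 ≤ x) : m1 = m2 :=
  le_antisymm (h1b m2 ((hmem m2).mpr h2)) (h2b m1 ((hmem m1).mp h1))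

theorem max_unique {m1 m2 : Char} {S1 S2 : List Char}
    (hmem : ∀ x, x ∈ S1 ↔ x ∈ S2)
    (h1 : m1 ∈ S1) (h1b : ∀ x ∈ S1, x ≤ m1)
    (h2 : m2 ∈ S2) (h2b : ∀ x ∈ S2, x ≤ m2) : m1 = m2 :=
  le_antisymm (h2b m1 ((hmem m1).mp h1)) (h1b m2 ((hmem m2).mpr h2))

theorem pairwise_le_getLast {l : List Char} (hp : l.Pairwise (· ≤ ·)) (h : l ≠ []) :
    ∀ x ∈ l, x ≤ l.getLast h := by
  induction l with
  | nil => simp at h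
  | cons c t ih =>
    intro x hx
    cases t with
    | nil =>
      rcases List.mem_cons.mp hx with rfl | hx
      · simp [List.getLast]
      · simp at hx
    | cons d u =>
      have htail := ih (List.Pairwise.sublist (List.sublist_cons_self _ _) hp) (by simp)
      have hstep : (c :: d :: u).getLast h = (d :: u).getLast (by simp) :=
        List.getLast_cons (by simp)
      rw [hstep]
      rcases List.mem_cons.mp hx with rfl | hx
      · exact le_trans ((List.pairwise_cons.mp hp).1 d List.mem_cons_self)
          (htail d List.mem_cons_self)
      · exact htail x hx

-- the head of sorted(xs) is a minimum of xs
theorem sorted_head_min (xs : List Char) {m : Char} {t : List Char}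
    (hs : PySem.List.sorted xs (fun x => x) false = m :: t) :
    m ∈ xs ∧ ∀ y ∈ xs, m ≤ y :=
  ⟨(PySem.List.mem_sorted _ _ _ _).mp (by rw [hs]; exact List.mem_cons_self),
   PySem.List.key_head_sorted_le xs (fun x => x) hs⟩

-- the last element of sorted(xs) is a maximum of xs
theorem sorted_last_max (xs : List Char) (h : PySem.List.sorted xs (fun x => x) false ≠ []) :
    (PySem.List.sorted xs (fun x => x) false).getLast h ∈ xs ∧
      ∀ y ∈ xs, y ≤ (PySem.List.sorted xs (fun x => x) false).getLast h := by
  refine ⟨(PySem.List.mem_sorted _ _ _ _).mp (List.getLast_mem h), fun y hy => ?_⟩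
  exact pairwise_le_getLast (PySem.List.sorted_pairwise xs (fun x => x)) h y
    ((PySem.List.mem_sorted _ _ _ _).mpr hy)

-- ===== VERDICT (by name: the statement is the Claim_ definition above) =====
theorem solve_spec : Claim_equal_solve := by
  intro A _
  unfold Spec_solve solve solve_alt
  rw [a_partition]
  simp only [List.nil_append]
  cases hev : A.toList.filter (fun c => c.toNat % 2 == 0) with
  | nil =>
    have hE0 : (PySem.Set.ofList A.toList).filter (fun c => c.toNat % 2 == 0) = [] :=
      (filter_ofList_eq_nil _ _).mpr hev
    simp [hE0]
  | cons ye te =>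
    cases hod : A.toList.filter (fun c => !(c.toNat % 2 == 0)) with
    | nil =>
      have hO0 : (PySem.Set.ofList A.toList).filter (fun c => !(c.toNat % 2 == 0)) = [] :=
        (filter_ofList_eq_nil _ _).mpr hod
      simp [hO0]
    | cons yo t_o =>
      -- A side: sorted lists are nonempty; name their head and last
      have hsne : PySem.List.sorted (ye :: te) (fun x => x) false ≠ [] := by
        simp [PySem.List.sorted_eq_nil_iff]
      have hone : PySem.List.sorted (yo :: t_o) (fun x => x) false ≠ [] := by
        simp [PySem.List.sorted_eq_nil_iff]
      rcases List.exists_cons_of_ne_nil hsne with ⟨me, se, hse⟩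
      rcases List.exists_cons_of_ne_nil hone with ⟨mo, so, hso⟩
      rcases sorted_head_min _ hse with ⟨hme_mem, hme_min⟩
      rcases sorted_head_min _ hso with ⟨hmo_mem, hmo_min⟩
      rcases sorted_last_max _ hsne with ⟨hle_mem, hle_max⟩
      rcases sorted_last_max _ hone with ⟨hlo_mem, hlo_max⟩
      -- B side: filtered sets are nonempty; name their min? and max?
      have hmemE := fun x => mem_filter_ofList (fun c => c.toNat % 2 == 0) A.toList x
      have hmemO := fun x => mem_filter_ofList (fun c => !(c.toNat % 2 == 0)) A.toList x
      have hEne : (PySem.Set.ofList A.toList).filter (fun c => c.toNat % 2 == 0) ≠ [] := by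
        intro h0; rw [(filter_ofList_eq_nil _ _), hev] at h0; simp at h0
      have hOne : (PySem.Set.ofList A.toList).filter (fun c => !(c.toNat % 2 == 0)) ≠ [] := by
        intro h0; rw [(filter_ofList_eq_nil _ _), hod] at h0; simp at h0
      cases hminE : PySem.List.min? ((PySem.Set.ofList A.toList).filter (fun c => c.toNat % 2 == 0)) (fun x => x) with
      | none => exact absurd ((PySem.List.min?_eq_none_iff _ _).mp hminE) hEne
      | some loE =>
      cases hmaxE : PySem.List.max? ((PySem.Set.ofList A.toList).filter (fun c => c.toNat % 2 == 0)) (fun x => x) with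
      | none => exact absurd ((PySem.List.max?_eq_none_iff _ _).mp hmaxE) hEne
      | some hiE =>
      cases hminO : PySem.List.min? ((PySem.Set.ofList A.toList).filter (fun c => !(c.toNat % 2 == 0))) (fun x => x) with
      | none => exact absurd ((PySem.List.min?_eq_none_iff _ _).mp hminO) hOne
      | some loO =>
      cases hmaxO : PySem.List.max? ((PySem.Set.ofList A.toList).filter (fun c => !(c.toNat % 2 == 0))) (fun x => x) with
      | none => exact absurd ((PySem.List.max?_eq_none_iff _ _).mp hmaxO) hOne
      | some hiO =>
      -- identify the four extremes on both sides
      have hmemE' : ∀ x, x ∈ ye :: te ↔ x ∈ (PySem.Set.ofList A.toList).filter (fun c => c.toNat % 2 == 0) := by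
        intro x; rw [hmemE x, hev]
      have hmemO' : ∀ x, x ∈ yo :: t_o ↔ x ∈ (PySem.Set.ofList A.toList).filter (fun c => !(c.toNat % 2 == 0)) := by
        intro x; rw [hmemO x, hod]
      have heqloE : me = loE :=
        min_unique hmemE' hme_mem hme_min (PySem.List.min?_mem hminE) (PySem.List.min?_isMin hminE)
      have heqhiE : (PySem.List.sorted (ye :: te) (fun x => x) false).getLast hsne = hiE :=
        max_unique hmemE' hle_mem hle_max (PySem.List.max?_mem hmaxE) (PySem.List.max?_isMax hmaxE)
      have heqloO : mo = loO :=
        min_unique hmemO' hmo_mem hmo_min (PySem.List.min?_mem hminO) (PySem.List.min?_isMin hminO)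
      have heqhiO : (PySem.List.sorted (yo :: t_o) (fun x => x) false).getLast hone = hiO :=
        max_unique hmemO' hlo_mem hlo_max (PySem.List.max?_mem hmaxO) (PySem.List.max?_isMax hmaxO)
      -- evaluate A's indexing
      have hgel : PySem.List.pyGet? (PySem.List.sorted (ye :: te) (fun x => x) false) (-1) = some hiE := by
        rw [PySem.List.pyGet?_neg_one, List.getLast?_eq_some_getLast hsne, heqhiE]
      have hgol : PySem.List.pyGet? (PySem.List.sorted (yo :: t_o) (fun x => x) false) (-1) = some hiO := by
        rw [PySem.List.pyGet?_neg_one, List.getLast?_eq_some_getLast hone, heqhiO]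
      have hEempty : ((PySem.Set.ofList A.toList).filter (fun c => c.toNat % 2 == 0)).isEmpty = false := by
        simpa [List.isEmpty_iff] using hEne
      have hOempty : ((PySem.Set.ofList A.toList).filter (fun c => !(c.toNat % 2 == 0))).isEmpty = false := by
        simpa [List.isEmpty_iff] using hOne
      rw [hse] at hgel
      rw [hso] at hgol
      rw [heqloE] at hgel
      rw [heqloO] at hgol
      simp only [hse, hso, hgel, hgol, PySem.List.pyGet?_zero_cons, Option.getD_some,
        heqloE, heqloO, hEempty, hOempty]
      by_cases h1 : (((hiE.toNat : Int) - (loO.toNat : Int)).natAbs != 1) = true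
      · simp [h1]
      · by_cases h2 : (((hiO.toNat : Int) - (loE.toNat : Int)).natAbs != 1) = true
        · simp [h1, h2]
        · simp [h1, h2]
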